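-- pv_equiv track=rewrite | github.com/daos-stack/daos | src/tests/ftest/cart/iv/cart_iv_two_node.py | _check_value
-- ===== SOURCE A (Python) =====
-- def _check_value(expected_value, received_value):
--     """
--         Checks that the received value (a hex string) contains the expected
--         value (a string). If the received value is longer than the expected
--         value, make sure any remaining characters are zeros
--
--         returns True if the values match, False otherwise
--     """
--     char = None
--     # Comparisons are lower case
--     received_value = received_value.lower()
--
--     # Convert the expected value to hex characters
--     expected_value_hex = "".join("{:02x}".format(ord(c)) \
--                                  for c in expected_value).lower()
--
--     # Make sure received value is at least as long as expected
--     if len(received_value) < len(expected_value_hex):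
--         return False
--
--     # Make sure received value starts with the expected value
--     if expected_value_hex not in received_value[:len(expected_value_hex)]:
--         return False
--
--     # Make sure all characters after the expected value are zeros (if any)
--     for char in received_value[len(expected_value_hex):]:
--         if char != "0":
--             return False
--
--     return True
-- ===== SOURCE B (Python) =====
-- _DIGITS = "0123456789abcdef"
--
--
-- def _check_value(expected_value, received_value):
--     """Consume the received hex string two characters per expected character,
--     then require the leftover to be all zeros (no joined hex string built)."""
--     rest = received_value.lower()
--     for c in expected_value:
--         o = ord(c)
--         if rest[:2] != _DIGITS[o // 16] + _DIGITS[o % 16]: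
--             return False
--         rest = rest[2:]
--     return all(ch == "0" for ch in rest)
-- ===== Notes on version B (the rewrite author's own statement) =====
-- stated objective: faster
-- what changed: Instead of building the joined expected hex string and doing a substring prefix test plus a trailing-zeros loop, B consumes the received string two characters at a time, comparing each chunk against the two hex digits of the corresponding expected character, and returns at the first mismatching chunk; the leftover is then checked to be all zeros.
import Mathlib
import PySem

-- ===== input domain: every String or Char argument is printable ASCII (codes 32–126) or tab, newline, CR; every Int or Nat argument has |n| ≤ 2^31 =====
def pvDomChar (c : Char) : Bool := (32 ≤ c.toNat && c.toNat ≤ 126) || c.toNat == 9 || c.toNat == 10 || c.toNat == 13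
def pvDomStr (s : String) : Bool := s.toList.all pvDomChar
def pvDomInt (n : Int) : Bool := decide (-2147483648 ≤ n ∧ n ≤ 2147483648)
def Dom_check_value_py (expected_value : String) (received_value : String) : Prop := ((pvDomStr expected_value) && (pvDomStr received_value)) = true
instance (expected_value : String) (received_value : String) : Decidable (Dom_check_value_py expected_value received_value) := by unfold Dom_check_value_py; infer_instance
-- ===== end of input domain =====

-- B consumes the received string two hex characters per expected character instead of
-- building the joined hex string, prefix-testing it and looping over the tail (objective: faster, constant-factor; measured).

-- ===== PORT A =====
-- "{:02x}".format(n) for a nonnegative code point (exact for 0 ≤ n)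
def pvHexDigit (n : Nat) : Char :=
  if n < 10 then Char.ofNat (48 + n) else Char.ofNat (87 + n)

def pvHexDigits (n : Nat) : List Char :=
  if h : n = 0 then [] else pvHexDigits (n / 16) ++ [pvHexDigit (n % 16)]
decreasing_by exact Nat.div_lt_self (Nat.pos_of_ne_zero h) (by omega)

def pvFmt02x (n : Nat) : List Char :=
  let d := if n = 0 then ['0'] else pvHexDigits n
  List.replicate (2 - d.length) '0' ++ d

-- "".join("{:02x}".format(ord(c)) for c in expected_value).lower()
def pvExpectedHex (exp : List Char) : List Char :=
  PySem.Chars.lower (PySem.Chars.join [] (exp.map (fun c => pvFmt02x c.toNat)))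

-- A's trailing loop: for char in … : if char != "0": return False; return True
def pvZerosLoop : List Char → Bool
  | [] => true
  | c :: rest => if c ≠ '0' then false else pvZerosLoop rest

def check_value_py (expected_value : String) (received_value : String) : Bool :=
  let r := PySem.Chars.lower received_value.toList
  let h := pvExpectedHex expected_value.toList
  if r.length < h.length then false
  else if ¬ (PySem.Chars.isIn h (PySem.List.slice r none (some (h.length : Int))) = true) then false
  else pvZerosLoop (PySem.List.slice r (some (h.length : Int)) none)

-- ===== PORT B =====
-- _DIGITS = "0123456789abcdef"; _DIGITS[i] (in range on the admitted inputs)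
def pvBDigits : List Char := "0123456789abcdef".toList

def pvBHex2 (o : Nat) : List Char :=
  [pvBDigits.getD (o / 16) '0', pvBDigits.getD (o % 16) '0']

-- the for-loop of Source B: consume rest two chars per expected char, then 'all zeros'
def pvChunkLoop : List Char → List Char → Bool
  | rest, [] => rest.all (fun ch => ch == '0')
  | rest, c :: cs =>
      if PySem.List.slice rest none (some 2) ≠ pvBHex2 c.toNat then false
      else pvChunkLoop (PySem.List.slice rest (some 2) none) cs

def check_value_py_alt (expected_value : String) (received_value : String) : Bool :=
  pvChunkLoop (PySem.Chars.lower received_value.toList) expected_value.toList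

-- ===== PRECONDITION & SPEC =====
def Spec_check_value_py (expected_value : String) (received_value : String) (out : Bool) : Prop := out = check_value_py_alt expected_value received_value
instance (expected_value : String) (received_value : String) (out : Bool) : Decidable (Spec_check_value_py expected_value received_value out) := by unfold Spec_check_value_py; infer_instance

-- ===== CLAIM =====
def Claim_equal_check_value_py : Prop := ∀ (expected_value : String) (received_value : String), Dom_check_value_py expected_value received_value → Spec_check_value_py expected_value received_value (check_value_py expected_value received_value)

-- ===== LEMMAS AND PROOFS =====

-- A's loop accepts exactly the all-zeros lists
theorem pvZerosLoop_eq (xs : List Char) :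
    pvZerosLoop xs = (xs == List.replicate xs.length '0') := by
  induction xs with
  | nil => rfl
  | cons c rest ih =>
    simp only [pvZerosLoop, List.length_cons, List.replicate_succ, ih]
    by_cases hc : c = '0' <;> simp [hc]

-- so does B's trailing 'all zeros' check
theorem pvAllZeros_eq (xs : List Char) :
    xs.all (fun ch => ch == '0') = (xs == List.replicate xs.length '0') := by
  induction xs with
  | nil => rfl
  | cons c rest ih =>
    simp only [List.all_cons, List.length_cons, List.replicate_succ, ih]
    by_cases hc : c = '0' <;> simp [hc]

-- the prefix-membership test plus zeros loop equals one equality against the built target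
theorem pv_core (h r : List Char) (hle : h.length ≤ r.length) :
    (PySem.Chars.isIn h (r.take h.length) && pvZerosLoop (r.drop h.length)) =
      (r == h ++ List.replicate (r.length - h.length) '0') := by
  rw [pvZerosLoop_eq]
  have hlen : (r.take h.length).length = h.length := by simp [hle]
  have hinfix : (PySem.Chars.isIn h (r.take h.length)) = (h == r.take h.length) := by
    by_cases he : h = r.take h.length
    · rw [← he]
      simp [PySem.Chars.isIn_iff_infix]
    · have hni : ¬ h <:+: r.take h.length := fun hinf => he (hinf.eq_of_length (by omega))
      rw [(PySem.Chars.isIn_eq_false_iff h _).mpr hni]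
      exact (beq_eq_false_iff_ne.mpr he).symm
  rw [hinfix, List.length_drop]
  rw [Bool.eq_iff_iff]
  simp only [Bool.and_eq_true, beq_iff_eq]
  constructor
  · rintro ⟨he, hz⟩
    conv_lhs => rw [← List.take_append_drop h.length r]
    rw [← he, hz]
  · intro hrr
    refine ⟨?_, ?_⟩
    · rw [hrr, List.take_left' rfl]
    · rw [hrr, List.drop_left' rfl]
      rw [hrr]
      simp

-- A's whole body equals the single equality against h ++ zero-padding
theorem pv_main (h r : List Char) :
    (if r.length < h.length then false
     else if ¬ (PySem.Chars.isIn h (PySem.List.slice r none (some (h.length : Int))) = true) then false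
     else pvZerosLoop (PySem.List.slice r (some (h.length : Int)) none))
    = (if r.length < h.length then false
       else r == h ++ List.replicate (r.length - h.length) '0') := by
  rw [PySem.List.slice_to r (Int.natCast_nonneg _), PySem.List.slice_from r (Int.natCast_nonneg _),
      Int.toNat_natCast]
  by_cases hlt : r.length < h.length
  · rw [if_pos hlt, if_pos hlt]
  · have hle : h.length ≤ r.length := by omega
    have key := pv_core h r hle
    rw [if_neg hlt, if_neg hlt]
    by_cases hin : PySem.Chars.isIn h (r.take h.length) = true
    · rw [if_neg (by simp [hin])]
      rw [hin, Bool.true_and] at key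
      exact key
    · rw [if_pos hin]
      have hf : PySem.Chars.isIn h (r.take h.length) = false := by simpa using hin
      rw [hf, Bool.false_and] at key
      exact key

-- pvHexDigits on one- and two-digit values
theorem pvHexDigits_small (n : Nat) (h1 : 0 < n) (h2 : n < 16) :
    pvHexDigits n = [pvHexDigit n] := by
  rw [pvHexDigits]
  have h16 : n / 16 = 0 := Nat.div_eq_of_lt h2
  have hm : n % 16 = n := Nat.mod_eq_of_lt h2
  rw [dif_neg (by omega), h16, hm, pvHexDigits]
  simp

theorem pvHexDigits_mid (n : Nat) (h1 : 16 ≤ n) (h2 : n < 256) :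
    pvHexDigits n = [pvHexDigit (n / 16), pvHexDigit (n % 16)] := by
  rw [pvHexDigits]
  have hq1 : 0 < n / 16 := Nat.div_pos (by omega) (by omega)
  have hq2 : n / 16 < 16 := Nat.div_lt_of_lt_mul (by omega)
  rw [dif_neg (by omega), pvHexDigits_small _ hq1 hq2]
  rfl

-- B's digit lookup agrees with A's digit function below 16
theorem pvBDigit_eq (m : Nat) (hm : m < 16) : pvBDigits.getD m '0' = pvHexDigit m := by
  interval_cases m <;> rfl

-- "{:02x}" and B's two-digit build agree below 256
theorem pvFmt02x_eq_hex2 (n : Nat) (hn : n < 256) : pvFmt02x n = pvBHex2 n := by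
  have hq : n / 16 < 16 := Nat.div_lt_of_lt_mul (by omega)
  have hm : n % 16 < 16 := Nat.mod_lt _ (by omega)
  rw [pvBHex2, pvBDigit_eq _ hq, pvBDigit_eq _ hm]
  rcases Nat.eq_zero_or_pos n with h0 | h0
  · subst h0; rfl
  by_cases h16 : n < 16
  · have hq0 : n / 16 = 0 := Nat.div_eq_of_lt h16
    have hm0 : n % 16 = n := Nat.mod_eq_of_lt h16
    rw [pvFmt02x]
    simp only [if_neg (Nat.pos_iff_ne_zero.mp h0)]
    rw [pvHexDigits_small n h0 (by omega), hq0, hm0]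
    rfl
  · rw [pvFmt02x]
    simp only [if_neg (Nat.pos_iff_ne_zero.mp h0)]
    rw [pvHexDigits_mid n (by omega) hn]
    rfl

-- lower is the identity on two hex digits (their chars are digits or a–f)
theorem pvLower_hex2 (n : Nat) (hn : n < 256) :
    PySem.Chars.lower (pvBHex2 n) = pvBHex2 n := by
  have hq : n / 16 < 16 := Nat.div_lt_of_lt_mul (by omega)
  have hm : n % 16 < 16 := Nat.mod_lt _ (by omega)
  rw [pvBHex2, pvBDigit_eq _ hq, pvBDigit_eq _ hm]
  revert hq hm
  generalize n / 16 = a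
  generalize n % 16 = b
  intro ha hb
  interval_cases a <;> interval_cases b <;> rfl

-- the joined, lowered expected hex string is the flattening of B's two-char chunks
theorem pvExpectedHex_eq (exp : List Char) (hd : ∀ c ∈ exp, c.toNat ≤ 126) :
    pvExpectedHex exp = (exp.map (fun c => pvBHex2 c.toNat)).flatten := by
  induction exp with
  | nil => rfl
  | cons c cs ih =>
    have hc : c.toNat < 256 := by have := hd c (by simp); omega
    have hcs : ∀ x ∈ cs, x.toNat ≤ 126 := fun x hx => hd x (by simp [hx])
    have hjoin : PySem.Chars.join ([] : List Char) ((c :: cs).map (fun c => pvFmt02x c.toNat))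
        = pvFmt02x c.toNat ++ PySem.Chars.join [] (cs.map (fun c => pvFmt02x c.toNat)) := by
      cases cs with
      | nil => simp [PySem.Chars.join, List.intercalate]
      | cons d ds => simp [List.map, PySem.Chars.join_cons_cons]
    rw [pvExpectedHex, hjoin, PySem.Chars.lower, List.map_append]
    rw [show (pvFmt02x c.toNat).map PySem.Chars.lowerChar = PySem.Chars.lower (pvFmt02x c.toNat) from rfl]
    rw [show (PySem.Chars.join [] (cs.map (fun c => pvFmt02x c.toNat))).map PySem.Chars.lowerChar
        = PySem.Chars.lower (PySem.Chars.join [] (cs.map (fun c => pvFmt02x c.toNat))) from rfl]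
    rw [pvFmt02x_eq_hex2 _ hc, pvLower_hex2 _ hc, ← pvExpectedHex, ih hcs]
    simp

-- pvBHex2 always has length 2
theorem pvBHex2_length (n : Nat) : (pvBHex2 n).length = 2 := rfl

-- B's chunk loop equals the single equality against the flattened chunks plus zero-padding
theorem pvChunkLoop_eq (exp : List Char) : ∀ r : List Char,
    pvChunkLoop r exp =
      (if r.length < ((exp.map (fun c => pvBHex2 c.toNat)).flatten).length then false
       else r == (exp.map (fun c => pvBHex2 c.toNat)).flatten
             ++ List.replicate (r.length - ((exp.map (fun c => pvBHex2 c.toNat)).flatten).length) '0') := by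
  induction exp with
  | nil =>
    intro r
    simp only [List.map_nil, List.flatten_nil, List.length_nil, List.nil_append]
    rw [if_neg (by omega), pvChunkLoop, pvAllZeros_eq]
    simp
  | cons c cs ih =>
    intro r
    have h2 : (pvBHex2 c.toNat).length = 2 := pvBHex2_length _
    rw [pvChunkLoop,
        PySem.List.slice_to r (show (0:Int) ≤ 2 by omega),
        PySem.List.slice_from r (show (0:Int) ≤ 2 by omega)]
    have ht2 : ((2:Int)).toNat = 2 := rfl
    rw [ht2]
    simp only [List.map_cons, List.flatten_cons, List.length_append, h2]
    by_cases hchunk : r.take 2 = pvBHex2 c.toNat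
    · have hlen2 : 2 ≤ r.length := by
        have := congrArg List.length hchunk
        simp [h2] at this
        omega
      have hr : r = pvBHex2 c.toNat ++ r.drop 2 := by
        conv_lhs => rw [← List.take_append_drop 2 r]
        rw [hchunk]
      rw [if_neg (by simp [hchunk]), ih (r.drop 2)]
      have hld : (r.drop 2).length = r.length - 2 := by simp
      by_cases hlt : r.length < 2 + ((cs.map (fun c => pvBHex2 c.toNat)).flatten).length
      · rw [if_pos hlt, if_pos (by omega)]
      · rw [if_neg hlt, if_neg (by omega), hld]
        have hrep : r.length - (2 + ((cs.map (fun c => pvBHex2 c.toNat)).flatten).length)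
            = r.length - 2 - ((cs.map (fun c => pvBHex2 c.toNat)).flatten).length := by omega
        rw [hrep]
        rw [Bool.eq_iff_iff]
        simp only [beq_iff_eq]
        constructor
        · intro h
          conv_lhs => rw [hr]
          rw [h, List.append_assoc]
        · intro h
          have h3 := congrArg (List.drop 2) h
          rw [List.append_assoc, List.drop_left' h2] at h3
          exact h3
    · rw [if_pos hchunk]
      by_cases hlt : r.length < 2 + ((cs.map (fun c => pvBHex2 c.toNat)).flatten).length
      · rw [if_pos hlt]
      · rw [if_neg hlt]
        refine ((beq_eq_false_iff_ne (a := r)).mpr ?_).symm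
        intro hr2
        apply hchunk
        have h3 := congrArg (List.take 2) hr2
        rw [List.append_assoc, List.take_left' h2] at h3
        exact h3

-- ===== VERDICT =====
theorem check_value_py_spec : Claim_equal_check_value_py := by
  intro ev rv hdom
  unfold Spec_check_value_py check_value_py check_value_py_alt
  have hd : ∀ c ∈ ev.toList, c.toNat ≤ 126 := by
    intro c hc
    have h1 : pvDomStr ev = true := by
      unfold Dom_check_value_py at hdom
      exact (Bool.and_eq_true _ _).mp hdom |>.1
    have := (List.all_eq_true.mp h1) c hc
    unfold pvDomChar at this
    simp only [Bool.or_eq_true, Bool.and_eq_true, decide_eq_true_eq, beq_iff_eq] at this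
    omega
  rw [pv_main, pvChunkLoop_eq, pvExpectedHex_eq ev.toList hd]
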